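-- pv_equiv track=rewrite | github.com/FranziskaReden/ParseTaxonName | utils.py | find_trash_words
-- ===== SOURCE A (Python) =====
-- def has_number(word:str) -> bool:
--     '''Function to check if any character in a given string (word)
--     is numeric. Retruns True or False accordingly'''
--     return any(str.isnumeric(c) for c in word)
--
-- def find_trash_words(name_sep:list) -> list:
--     '''Check each word in the input list of strings name_sep.
--     Find words to remove from string that are not needed.
--     Return the name, and two sets of list containing the words
--     to be removed.'''
--
--     rm1 = []
--     rm2 = []
--     tmp = 0
--
--     for i, value in enumerate(name_sep):
--     # Remove all words containing numbers until encountering first word that does not.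
--         if tmp == 0 and has_number(name_sep[i]) is True:
--             rm1.append(name_sep[i])
--         else:
--             tmp = 1
--
--         if name_sep[i] in ['sp', 'cf', 'pv', 'aff', 'var']:
--             name_sep[i] = name_sep[i] + '.'
--
--         elif name_sep[i].upper() in ['GENOME', 'REVERSED']:
--             rm1.append(name_sep[i])
--
--         if has_number(name_sep[i]) is True or len(name_sep[i])<3:
--             if name_sep[i] not in rm1:
--                 rm2.append(name_sep[i])
--
--     return name_sep, rm1, rm2
-- ===== SOURCE B (Python) =====
-- def has_number(word:str) -> bool:
--     return any(str.isnumeric(c) for c in word)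
--
-- def find_trash_words(name_sep:list) -> list:
--     DOTTED = ['sp', 'cf', 'pv', 'aff', 'var']
--     # pass 1: leading prefix of number-containing words (original words)
--     rm1 = []
--     for w in name_sep:
--         if not has_number(w):
--             break
--         rm1.append(w)
--     # pass 2: dotted replacement, in place
--     for i, w in enumerate(name_sep):
--         if w in DOTTED:
--             name_sep[i] = w + '.'
--     # pass 3: collect GENOME/REVERSED into rm1 and short/numeric words into rm2
--     rm2 = []
--     for w in name_sep:
--         if w.upper() in ['GENOME', 'REVERSED']:
--             rm1.append(w)
--         if (has_number(w) or len(w) < 3) and w not in rm1: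
--             rm2.append(w)
--     return name_sep, rm1, rm2
-- ===== Notes on version B (the rewrite author's own statement) =====
-- stated objective: alternative
-- what changed: A's single enumerate loop with a tmp phase-flag and in-loop elif chain is replaced by three plain passes: an explicit takewhile-style scan collecting the leading digit-containing prefix into rm1, a map doing the dotted-keyword replacement, and one collection pass that appends GENOME/REVERSED words to rm1 and short/numeric words not in rm1 to rm2.
import Mathlib
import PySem

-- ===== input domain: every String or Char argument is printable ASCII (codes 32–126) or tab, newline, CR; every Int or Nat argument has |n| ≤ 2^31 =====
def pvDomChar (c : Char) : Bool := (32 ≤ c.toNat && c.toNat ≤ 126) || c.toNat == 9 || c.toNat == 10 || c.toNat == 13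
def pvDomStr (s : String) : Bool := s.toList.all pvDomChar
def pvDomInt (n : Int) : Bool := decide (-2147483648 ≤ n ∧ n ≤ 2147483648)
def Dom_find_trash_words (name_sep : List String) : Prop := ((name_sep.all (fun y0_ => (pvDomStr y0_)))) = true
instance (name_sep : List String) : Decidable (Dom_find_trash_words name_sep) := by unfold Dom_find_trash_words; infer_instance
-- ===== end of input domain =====

-- B replaces A's single flag-driven loop by three plain passes (digit prefix, dot replacement, collection);
-- same cost, alternative decomposition. Python A mutates name_sep in place (B does the same); the theorem is
-- about the returned triple.

-- ===== PORT A =====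
-- has_number: str.isnumeric coincides with isdigit on the printable-ASCII domain (Dom); exact there.
def hasNumber (w : String) : Bool := w.toList.any PySem.Chars.isdigit

def dotted5 : List String := ["sp", "cf", "pv", "aff", "var"]
def gen2 : List String := ["GENOME", "REVERSED"]

-- the enumerate loop of A: state (output words so far, rm1, rm2, tmp)
def goA : List String → List String → List String → List String → Int → List String × List String × List String
  | [], acc, rm1, rm2, _tmp => (acc, rm1, rm2)
  | w :: rest, acc, rm1, rm2, tmp =>
    let rm1a := if tmp = 0 ∧ hasNumber w = true then rm1 ++ [w] else rm1
    let tmpa : Int := if tmp = 0 ∧ hasNumber w = true then tmp else 1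
    let w' := if w ∈ dotted5 then w ++ "." else w
    let rm1b := if w ∈ dotted5 then rm1a
                else if PySem.Str.upper w ∈ gen2 then rm1a ++ [w] else rm1a
    let rm2a := if (hasNumber w' = true ∨ PySem.Str.len w' < 3) ∧ w' ∉ rm1b then rm2 ++ [w'] else rm2
    goA rest (acc ++ [w']) rm1b rm2a tmpa

def find_trash_words (name_sep : List String) : List String × List String × List String :=
  goA name_sep [] [] [] 0

-- ===== PORT B =====
-- pass 1: leading prefix of number-containing words
def prefB : List String → List String
  | [] => []
  | w :: rest => if hasNumber w then w :: prefB rest else []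

-- pass 2: dotted replacement
def dotB (w : String) : String := if w ∈ dotted5 then w ++ "." else w

-- pass 3: collect GENOME/REVERSED into rm1 and short/numeric words into rm2
def goB : List String → List String → List String → List String × List String
  | [], rm1, rm2 => (rm1, rm2)
  | w :: rest, rm1, rm2 =>
    let rm1a := if PySem.Str.upper w ∈ gen2 then rm1 ++ [w] else rm1
    let rm2a := if (hasNumber w = true ∨ PySem.Str.len w < 3) ∧ w ∉ rm1a then rm2 ++ [w] else rm2
    goB rest rm1a rm2a

def find_trash_words_alt (name_sep : List String) : List String × List String × List String :=
  let rm1 := prefB name_sep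
  let ns := name_sep.map dotB
  let p := goB ns rm1 []
  (ns, p.1, p.2)

-- ===== PRECONDITION & SPEC =====
def Spec_find_trash_words (name_sep : List String) (out : List String × List String × List String) : Prop := out = find_trash_words_alt name_sep
instance (name_sep : List String) (out : List String × List String × List String) : Decidable (Spec_find_trash_words name_sep out) := by unfold Spec_find_trash_words; infer_instance

-- ===== CLAIM (what is proved, stated in full; the proofs are below) =====
def Claim_equal_find_trash_words : Prop := ∀ (name_sep : List String), Dom_find_trash_words name_sep → Spec_find_trash_words name_sep (find_trash_words name_sep)

-- ===== LEMMAS AND PROOFS =====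

lemma digit_not_lower (c : Char) (h : PySem.Chars.isdigit c = true) : PySem.Chars.islower c = false := by
  simp only [PySem.Chars.isdigit, Bool.and_eq_true, decide_eq_true_eq] at h
  simp only [PySem.Chars.islower, Bool.and_eq_false_iff, decide_eq_false_iff_not]
  exact Or.inl fun hle => absurd (le_trans hle h.2) (by decide)

lemma upperChar_digit (c : Char) (h : PySem.Chars.isdigit c = true) : PySem.Chars.upperChar c = c := by
  simp [PySem.Chars.upperChar, digit_not_lower c h]

-- a word whose .upper() is GENOME/REVERSED contains no digit
lemma gen_no_digit (w : String) (h : PySem.Str.upper w ∈ gen2) : hasNumber w = false := by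
  by_contra hx
  rw [Bool.not_eq_false, hasNumber, List.any_eq_true] at hx
  obtain ⟨c, hc, hd⟩ := hx
  have hm : PySem.Chars.upperChar c ∈ (PySem.Str.upper w).toList := by
    rw [PySem.Str.toList_upper]
    exact List.mem_map_of_mem hc
  rw [upperChar_digit c hd] at hm
  simp only [gen2, List.mem_cons, List.not_mem_nil, or_false] at h
  rcases h with h | h <;> rw [h] at hm
  · have := List.all_eq_true.mp (by decide : "GENOME".toList.all (fun c => !PySem.Chars.isdigit c) = true) c hm
    simp [hd] at this
  · have := List.all_eq_true.mp (by decide : "REVERSED".toList.all (fun c => !PySem.Chars.isdigit c) = true) c hm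
    simp [hd] at this

-- a dotted keyword contains no digit
lemma dotted_no_digit (w : String) (h : w ∈ dotted5) : hasNumber w = false := by
  simp only [dotted5, List.mem_cons, List.not_mem_nil, or_false] at h
  rcases h with rfl | rfl | rfl | rfl | rfl <;> decide

-- after adding the dot, the uppercase is never GENOME/REVERSED
lemma dotted_upper_not_gen (w : String) (h : w ∈ dotted5) : PySem.Str.upper (w ++ ".") ∉ gen2 := by
  simp only [dotted5, List.mem_cons, List.not_mem_nil, or_false] at h
  rcases h with rfl | rfl | rfl | rfl | rfl <;> decide

-- the tmp = 1 phase of A is exactly B's pass 3 on the dot-replaced words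
lemma goA_one (ws acc rm1 rm2 : List String) :
    goA ws acc rm1 rm2 1 =
      (acc ++ ws.map dotB, (goB (ws.map dotB) rm1 rm2).1, (goB (ws.map dotB) rm1 rm2).2) := by
  induction ws generalizing acc rm1 rm2 with
  | nil => simp [goA, goB]
  | cons w rest ih =>
    by_cases hd : w ∈ dotted5
    · have hg' := dotted_upper_not_gen w hd
      simp [goA, goB, dotB, hd, hg', ih, List.append_assoc]
    · simp [goA, goB, dotB, hd, ih, List.append_assoc]

-- the whole of A equals B: rm1 starts as the digit prefix, then pass 3 runs
lemma goA_zero (ws acc rm1 rm2 : List String) :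
    goA ws acc rm1 rm2 0 =
      (acc ++ ws.map dotB,
       (goB (ws.map dotB) (rm1 ++ prefB ws) rm2).1,
       (goB (ws.map dotB) (rm1 ++ prefB ws) rm2).2) := by
  induction ws generalizing acc rm1 rm2 with
  | nil => simp [goA, goB, prefB]
  | cons w rest ih =>
    by_cases hn : hasNumber w = true
    · have hd : w ∉ dotted5 := fun h => by rw [dotted_no_digit w h] at hn; cases hn
      have hg : PySem.Str.upper w ∉ gen2 := fun h => by rw [gen_no_digit w h] at hn; cases hn
      have e1 : prefB (w :: rest) = w :: prefB rest := by simp [prefB, hn]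
      rw [e1]
      have m2 : w ∈ rm1 ++ w :: prefB rest := by simp
      simp [goA, goB, dotB, hn, hd, hg, m2, ih, List.append_assoc]
    · have e1 : prefB (w :: rest) = [] := by
        simp only [Bool.not_eq_true] at hn
        simp [prefB, hn]
      rw [e1, List.append_nil]
      by_cases hd : w ∈ dotted5
      · have hg' := dotted_upper_not_gen w hd
        simp [goA, goB, dotB, hn, hd, hg', goA_one, List.append_assoc]
      · simp [goA, goB, dotB, hn, hd, goA_one, List.append_assoc]

-- ===== VERDICT (by name: the statement is the Claim_ definition above) =====
theorem find_trash_words_spec : Claim_equal_find_trash_words := by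
  intro name_sep _hdom
  unfold Spec_find_trash_words find_trash_words find_trash_words_alt
  rw [goA_zero]
  simp
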